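-- pv_equiv track=rewrite | github.com/xlrobotics/preference-based-planning | parser/scltlpref.py | ltl_eventually
-- ===== SOURCE A (Python) =====
-- def ltl_eventually(args):
--     """Parse LTLf Eventually."""
--     if len(args) == 1:
--         return str(args[0])
--     else:
--         f = str(args[-1])
--         for _ in args[:-1]:
--             f = f"F({f})"
--         return f
-- ===== SOURCE B (Python) =====
-- def ltl_eventually(args):
--     """Parse LTLf Eventually."""
--     d = len(args) - 1
--     return "F(" * d + str(args[-1]) + ")" * d
-- ===== Notes on version B (the rewrite author's own statement) =====
-- stated objective: faster
-- what changed: Replaces the branch plus wrapping loop (which rebuilds the growing string once per argument) with a closed form: d = len(args)-1 copies of 'F(' concatenated before str(args[-1]) and d copies of ')' after it.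
import Mathlib
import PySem

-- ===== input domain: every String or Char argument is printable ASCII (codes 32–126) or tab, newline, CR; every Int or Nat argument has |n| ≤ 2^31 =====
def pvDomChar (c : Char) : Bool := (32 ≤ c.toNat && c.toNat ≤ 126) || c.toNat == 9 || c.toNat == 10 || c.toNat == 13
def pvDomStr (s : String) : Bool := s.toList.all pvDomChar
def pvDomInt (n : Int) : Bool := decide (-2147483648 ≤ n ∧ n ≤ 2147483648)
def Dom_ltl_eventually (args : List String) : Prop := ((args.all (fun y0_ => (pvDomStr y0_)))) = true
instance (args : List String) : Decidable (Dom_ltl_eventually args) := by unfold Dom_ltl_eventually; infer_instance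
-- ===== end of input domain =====

-- A's wrapping loop is replaced in B by a closed form: d = len-1 copies of "F(" before args[-1] and d copies of ")" after.


-- ===== PORT A =====
def ltl_eventually (args : List String) : String :=
  if args.length == 1 then (PySem.List.pyGet? args 0).getD ""
  else
    let f := (PySem.List.pyGet? args (-1)).getD ""
    (PySem.List.slice args none (some (-1))).foldl (fun f _ => "F(" ++ f ++ ")") f

-- ===== PORT B =====
-- "F(" * d  /  ")" * d
def repStr (n : Nat) (s : String) : String := String.join (List.replicate n s)

def ltl_eventually_alt (args : List String) : String :=
  let d := args.length - 1
  repStr d "F(" ++ (PySem.List.pyGet? args (-1)).getD "" ++ repStr d ")"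

-- ===== PRECONDITION & SPEC =====
-- A raises IndexError on the empty list (args[-1]); B does too, so the empty list is excluded.
def Pre_ltl_eventually (args : List String) : Prop := args ≠ []
instance (args : List String) : Decidable (Pre_ltl_eventually args) := by unfold Pre_ltl_eventually; infer_instance
def pvWitness_ltl_eventually : List String := ["a", "b"]

def Spec_ltl_eventually (args : List String) (out : String) : Prop := out = ltl_eventually_alt args
instance (args : List String) (out : String) : Decidable (Spec_ltl_eventually args out) := by unfold Spec_ltl_eventually; infer_instance

-- ===== CLAIM (what is proved, stated in full; the proofs are below) =====
def Claim_equal_ltl_eventually : Prop := ∀ (args : List String), Dom_ltl_eventually args → Pre_ltl_eventually args → Spec_ltl_eventually args (ltl_eventually args)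

-- ===== LEMMAS AND PROOFS =====

theorem str_foldl_shift (l : List String) (a : String) :
    l.foldl (fun r s => r ++ s) a = a ++ l.foldl (fun r s => r ++ s) "" := by
  induction l generalizing a with
  | nil => simp
  | cons b t ih =>
    simp only [List.foldl_cons]
    rw [ih (a ++ b), ih ("" ++ b)]
    simp [String.append_assoc]

theorem repStr_zero (s : String) : repStr 0 s = "" := by
  simp [repStr, String.join]

theorem repStr_succ (n : Nat) (s : String) : repStr (n + 1) s = s ++ repStr n s := by
  simp only [repStr, List.replicate_succ, String.join, List.foldl_cons]
  rw [str_foldl_shift]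
  simp

theorem repStr_comm (n : Nat) (s : String) : repStr n s ++ s = s ++ repStr n s := by
  induction n with
  | zero => simp [repStr_zero]
  | succ k ih => rw [repStr_succ, String.append_assoc, ih]

theorem repStr_snoc (n : Nat) (s : String) : repStr (n + 1) s = repStr n s ++ s := by
  rw [repStr_succ, ← repStr_comm]

theorem wrap_fold (l : List String) (f : String) :
    l.foldl (fun f _ => "F(" ++ f ++ ")") f = repStr l.length "F(" ++ f ++ repStr l.length ")" := by
  induction l generalizing f with
  | nil => simp [repStr_zero]
  | cons a t ih =>
    simp only [List.foldl_cons, List.length_cons]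
    rw [ih, repStr_snoc t.length "F(", repStr_succ t.length ")"]
    simp [String.append_assoc]

-- ===== VERDICT (by name: the statement is the Claim_ definition above) =====
theorem ltl_eventually_spec : Claim_equal_ltl_eventually := by
  intro args _ hpre
  unfold Spec_ltl_eventually ltl_eventually ltl_eventually_alt
  rcases args.eq_nil_or_concat with rfl | ⟨init, last, rfl⟩
  · exact absurd rfl hpre
  · simp only [List.concat_eq_append]
    rw [PySem.List.pyGet?_neg_one_append_singleton]
    rcases init with _ | ⟨x, xs⟩
    · simp [repStr_zero]
    · have hif : ((x :: xs ++ [last]).length == 1) = false := by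
        simp [List.length_append]
      rw [if_neg (by simp [hif])]
      rw [PySem.List.slice_to_neg_one, List.dropLast_concat, wrap_fold]
      simp [List.length_append]
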